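-- pv_equiv track=rewrite | github.com/ebg1223/inngest-cleanup | v3/diagnostic_check.py | hex_to_ulid
-- ===== SOURCE A (Python) =====
-- def hex_to_ulid(hex_str):
--     """Convert hex string to ULID for Redis lookups."""
--     ALPHABET = "0123456789ABCDEFGHJKMNPQRSTVWXYZ"
--     value = int(hex_str, 16)
--     if value == 0:
--         return ALPHABET[0] * 26
--     chars = []
--     while value > 0 and len(chars) < 26:
--         chars.append(ALPHABET[value % 32])
--         value //= 32
--     result = ''.join(reversed(chars))
--     return ALPHABET[0] * (26 - len(result)) + result
-- ===== SOURCE B (Python) =====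
-- def hex_to_ulid(hex_str):
--     """Convert hex string to ULID for Redis lookups."""
--     ALPHABET = "0123456789ABCDEFGHJKMNPQRSTVWXYZ"
--     value = int(hex_str, 16)
--     if value <= 0:
--         return ALPHABET[0] * 26
--     value %= 32 ** 26
--     return ''.join(ALPHABET[(value // 32 ** (25 - i)) % 32] for i in range(26))
-- ===== Notes on version B (the rewrite author's own statement) =====
-- stated objective: simpler
-- what changed: B extracts the 26 base-32 digits directly MSB-first by fixed place value ((value // 32**(25-i)) % 32) in a single comprehension after one reduction mod 32**26, instead of A's peel-least-significant-digit loop followed by reverse and left-pad.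
import Mathlib
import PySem

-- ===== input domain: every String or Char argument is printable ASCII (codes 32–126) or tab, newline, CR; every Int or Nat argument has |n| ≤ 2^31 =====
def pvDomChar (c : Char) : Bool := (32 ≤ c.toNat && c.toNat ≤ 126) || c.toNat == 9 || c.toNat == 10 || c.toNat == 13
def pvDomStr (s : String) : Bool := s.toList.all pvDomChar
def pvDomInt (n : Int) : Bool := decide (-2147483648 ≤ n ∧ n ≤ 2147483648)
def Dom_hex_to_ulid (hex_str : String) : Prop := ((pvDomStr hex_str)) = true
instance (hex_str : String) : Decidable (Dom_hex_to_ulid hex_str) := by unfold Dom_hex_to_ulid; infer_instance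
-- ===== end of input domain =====

-- B builds the 26-char ULID directly MSB-first by place value, dropping A's peel-LSB loop, reverse and pad (simpler).

-- ===== PORT A =====
def ulidAlphabet : String := "0123456789ABCDEFGHJKMNPQRSTVWXYZ"

-- A's while loop: peel least-significant base-32 digits, at most 26
def hexLoop (value : Int) (chars : List Char) : List Char :=
  if h : value > 0 ∧ chars.length < 26 then
    hexLoop (PySem.Int.floordiv value 32)
      (chars ++ [(PySem.Str.pyGet? ulidAlphabet (PySem.Int.mod value 32)).getD '0'])
  else chars
termination_by 26 - chars.length
decreasing_by simp; omega

def hex_to_ulid (hex_str : String) : String :=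
  match PySem.Int.ofStrBase? hex_str 16 with
  | none => ""   -- unreachable under Pre_: int(hex_str, 16) raises ValueError
  | some value =>
    if value = 0 then String.ofList (List.replicate 26 '0')
    else
      let chars := hexLoop value []
      String.ofList (List.replicate (26 - chars.reverse.length) '0' ++ chars.reverse)

-- ===== PORT B =====
def hex_to_ulid_alt (hex_str : String) : String :=
  match PySem.Int.ofStrBase? hex_str 16 with
  | none => ""   -- unreachable under Pre_
  | some value =>
    if value ≤ 0 then String.ofList (List.replicate 26 '0')
    else
      let v := PySem.Int.mod value ((32 : Int) ^ 26)
      String.ofList ((PySem.List.pyRange 0 26 1).map (fun i =>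
        (PySem.Str.pyGet? ulidAlphabet
          (PySem.Int.mod (PySem.Int.floordiv v ((32 : Int) ^ (25 - i).toNat)) 32)).getD '0'))

-- ===== PRECONDITION & SPEC =====
-- Pre_ excludes exactly the strings on which int(hex_str, 16) raises ValueError (A returns nowhere else abnormally).
def Pre_hex_to_ulid (hex_str : String) : Prop := (PySem.Int.ofStrBase? hex_str 16).isSome = true
instance (hex_str : String) : Decidable (Pre_hex_to_ulid hex_str) := by unfold Pre_hex_to_ulid; infer_instance
def pvWitness_hex_to_ulid : String := "ff"

def Spec_hex_to_ulid (hex_str : String) (out : String) : Prop := out = hex_to_ulid_alt hex_str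
instance (hex_str : String) (out : String) : Decidable (Spec_hex_to_ulid hex_str out) := by unfold Spec_hex_to_ulid; infer_instance

-- ===== CLAIM (what is proved, stated in full; the proofs are below) =====
def Claim_equal_hex_to_ulid : Prop := ∀ (hex_str : String), Dom_hex_to_ulid hex_str → Pre_hex_to_ulid hex_str → Spec_hex_to_ulid hex_str (hex_to_ulid hex_str)

-- ===== LEMMAS AND PROOFS =====

-- digit character of x (both ports index the alphabet with x % 32)
def pvD (x : Int) : Char := (PySem.Str.pyGet? ulidAlphabet (PySem.Int.mod x 32)).getD '0'

-- LSB-first base-32 digits of v, truncated when v runs out (what A's loop collects)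
def pvTrunc : Int → Nat → List Char
  | _, 0 => []
  | v, k+1 => if v > 0 then pvD v :: pvTrunc (PySem.Int.floordiv v 32) k else []

-- full k LSB-first base-32 digits of v (with trailing zero digits)
def pvFull : Int → Nat → List Char
  | _, 0 => []
  | v, k+1 => pvD v :: pvFull (PySem.Int.floordiv v 32) k

lemma pvTrunc_nonpos (v : Int) (k : Nat) (h : ¬ v > 0) : pvTrunc v k = [] := by
  cases k <;> simp [pvTrunc, h]

lemma hexLoop_eq (v : Int) (acc : List Char) :
    hexLoop v acc = acc ++ pvTrunc v (26 - acc.length) := by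
  fun_induction hexLoop v acc with
  | case1 v acc h ih =>
      obtain ⟨hv, hl⟩ := h
      rw [ih]
      obtain ⟨k, hk⟩ : ∃ k, 26 - acc.length = k + 1 := ⟨26 - acc.length - 1, by omega⟩
      simp only [List.length_append, List.length_cons, List.length_nil]
      have : 26 - (acc.length + 1) = k := by omega
      rw [this, hk]
      simp [pvTrunc, hv, pvD]
  | case2 v acc h =>
      rcases not_and_or.mp h with h1 | h2
      · rw [pvTrunc_nonpos v _ h1]; simp
      · have : 26 - acc.length = 0 := by omega
        rw [this]; simp [pvTrunc]

lemma pvFull_zero (k : Nat) : pvFull 0 k = List.replicate k '0' := by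
  induction k with
  | zero => simp [pvFull]
  | succ k ih =>
      have h0 : pvD 0 = '0' := by decide
      simp [pvFull, PySem.Int.floordiv, ih, h0, List.replicate_succ]

lemma floordiv_nonneg' (v : Int) (h : 0 ≤ v) : 0 ≤ PySem.Int.floordiv v 32 := by
  rw [PySem.Int.floordiv_eq_ediv_of_pos (by norm_num)]
  exact Int.ediv_nonneg h (by norm_num)

lemma pvTrunc_pad (k : Nat) : ∀ v : Int, 0 ≤ v →
    pvTrunc v k ++ List.replicate (k - (pvTrunc v k).length) '0' = pvFull v k := by
  induction k with
  | zero => intro v _; simp [pvTrunc, pvFull]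
  | succ k ih =>
      intro v hv
      by_cases h : v > 0
      · simp only [pvTrunc, pvFull, h, if_true, List.length_cons, List.cons_append]
        rw [Nat.succ_sub_succ]
        rw [ih _ (floordiv_nonneg' v hv)]
      · have hv0 : v = 0 := by omega
        subst hv0
        simp [pvTrunc, pvFull_zero]

lemma pvFull_mod (k : Nat) : ∀ v : Int, pvFull v k = pvFull (PySem.Int.mod v ((32:Int) ^ k)) k := by
  induction k with
  | zero => intro v; simp [pvFull]
  | succ k ih =>
      intro v
      have hp : (0:Int) < 32 ^ (k+1) := by positivity
      have hm : PySem.Int.mod v ((32:Int) ^ (k+1)) = v % 32 ^ (k+1) :=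
        PySem.Int.mod_eq_emod_of_pos hp
      simp only [pvFull]
      congr 1
      · unfold pvD
        congr 1
        rw [PySem.Int.mod_eq_emod_of_pos (by norm_num : (0:Int) < 32),
            PySem.Int.mod_eq_emod_of_pos (by norm_num : (0:Int) < 32), hm]
        rw [Int.emod_emod_of_dvd v (dvd_pow_self (32:Int) (Nat.succ_ne_zero k))]
      · rw [ih (PySem.Int.floordiv v 32), ih (PySem.Int.floordiv (PySem.Int.mod v (32^(k+1))) 32)]
        congr 1
        rw [hm]
        rw [PySem.Int.mod_eq_emod_of_pos (by positivity : (0:Int) < 32 ^ k),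
            PySem.Int.mod_eq_emod_of_pos (by positivity : (0:Int) < 32 ^ k)]
        rw [PySem.Int.floordiv_eq_ediv_of_pos (by norm_num : (0:Int) < 32),
            PySem.Int.floordiv_eq_ediv_of_pos (by norm_num : (0:Int) < 32)]
        have hv : v = v % 32 ^ (k+1) + (v / 32 ^ (k+1)) * 32 ^ (k+1) := by
          have := Int.ediv_add_emod v (32 ^ (k+1)); linarith
        have hdiv : v / 32 = v % 32 ^ (k+1) / 32 + (v / 32 ^ (k+1)) * 32 ^ k := by
          conv_lhs => rw [hv]
          rw [pow_succ, ← mul_assoc, Int.add_mul_ediv_right _ _ (by norm_num : (32:Int) ≠ 0)]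
        rw [hdiv, mul_comm (v / 32 ^ (k+1)) ((32:Int) ^ k), Int.add_mul_emod_self_left]

lemma pvFull_map (k : Nat) : ∀ v : Int,
    pvFull v k = (List.range k).map (fun j => pvD (PySem.Int.floordiv v ((32:Int) ^ j))) := by
  induction k with
  | zero => intro v; simp [pvFull]
  | succ k ih =>
      intro v
      rw [List.range_succ_eq_map]
      simp only [pvFull, List.map_cons, List.map_map]
      congr 1
      · congr 1
        rw [pow_zero, PySem.Int.floordiv_eq_ediv_of_pos (by norm_num : (0:Int) < 1), Int.ediv_one]
      · rw [ih]
        apply List.map_congr_left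
        intro j _
        simp only [Function.comp]
        have key : PySem.Int.floordiv (PySem.Int.floordiv v 32) ((32:Int) ^ j)
            = PySem.Int.floordiv v ((32:Int) ^ (j+1)) := by
          rw [PySem.Int.floordiv_eq_ediv_of_pos (by norm_num : (0:Int) < 32),
              PySem.Int.floordiv_eq_ediv_of_pos (by positivity : (0:Int) < (32:Int) ^ j),
              PySem.Int.floordiv_eq_ediv_of_pos (by positivity : (0:Int) < (32:Int) ^ (j+1)),
              Int.ediv_ediv_of_nonneg (by norm_num : (0:Int) ≤ 32), pow_succ]
          ring_nf
        rw [key]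

lemma hex_to_ulid_eq_alt (hex_str : String) : hex_to_ulid hex_str = hex_to_ulid_alt hex_str := by
  unfold hex_to_ulid hex_to_ulid_alt
  cases heq : PySem.Int.ofStrBase? hex_str 16 with
  | none => rfl
  | some value =>
    simp only
    by_cases h0 : value = 0
    · simp [h0]
    · rw [if_neg h0]
      by_cases hneg : value ≤ 0
      · rw [if_pos hneg]
        rw [hexLoop_eq]
        rw [pvTrunc_nonpos value _ (by omega)]
        simp
      · rw [if_neg hneg]
        have hv : 0 ≤ value := by omega
        rw [hexLoop_eq]
        simp only [List.nil_append, List.length_nil, Nat.sub_zero]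
        congr 1
        have hA : List.replicate (26 - (pvTrunc value 26).reverse.length) '0'
              ++ (pvTrunc value 26).reverse = (pvFull value 26).reverse := by
          rw [← pvTrunc_pad 26 value hv]
          rw [List.reverse_append, List.reverse_replicate, List.length_reverse]
        rw [hA, pvFull_mod 26 value, pvFull_map]
        apply List.ext_getElem
        · simp [PySem.List.length_pyRange_one]
        · intro i h1 h2
          simp only [List.getElem_reverse, List.getElem_map, List.getElem_range,
            List.length_map, List.length_range]
          rw [PySem.List.getElem_pyRange_one]
          have hi : i < 26 := by simpa [PySem.List.length_pyRange_one] using h2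
          have : ((25:Int) - (0 + (i:Int))).toNat = 25 - i := by omega
          rw [this]
          congr 2

-- ===== VERDICT (by name: the statement is the Claim_ definition above) =====
theorem hex_to_ulid_spec : Claim_equal_hex_to_ulid := by
  intro hex_str _ _
  unfold Spec_hex_to_ulid
  exact hex_to_ulid_eq_alt hex_str
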